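-- pv_equiv track=rewrite | github.com/prasadmahendra/ttb-pymono | treasury/services/gateways/ttb_api/main/application/usecases/label_data_analysis_pytesseract.py | _check_product_class_match
-- ===== SOURCE A (Python) =====
-- def _check_product_class_match(given_class: str, extracted_text: str) -> bool:
--     """
--     Check for product class match, allowing close equivalents.
--     E.g., Beer and Lager Beer are the same, Gin and London Gin are the same.
--     """
--     # Direct match
--     if given_class in extracted_text:
--         return True
--
--     # Common equivalents mapping
--     equivalents = {
--         'beer': ['lager beer', 'lager', 'ale', 'pilsner'],
--         'lager beer': ['beer', 'lager', 'pilsner'],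
--         'gin': ['london gin', 'london dry gin', 'dry gin'],
--         'london gin': ['gin', 'london dry gin', 'dry gin'],
--         'vodka': ['vodka'],
--         'whiskey': ['whisky', 'bourbon', 'rye whiskey', 'scotch'],
--         'whisky': ['whiskey', 'bourbon', 'rye whisky', 'scotch'],
--         'bourbon': ['whiskey', 'whisky', 'kentucky bourbon', 'straight bourbon'],
--         'rum': ['rum', 'dark rum', 'white rum', 'gold rum'],
--         'tequila': ['tequila', 'mezcal'],
--         'wine': ['wine', 'red wine', 'white wine', 'rose wine'],
--     }
--
--     # Check if given class has equivalents and any match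
--     if given_class in equivalents:
--         for equivalent in equivalents[given_class]:
--             if equivalent in extracted_text:
--                 return True
--
--     # Check if extracted text contains the base category
--     for base_class, variants in equivalents.items():
--         if given_class in variants and base_class in extracted_text:
--             return True
--
--     return False
-- ===== SOURCE B (Python) =====
-- # Flat precomputed candidate table: the symmetric closure of the equivalents map,
-- # flattened offline into one dict term -> tuple of candidate substrings (the term
-- # itself first).  A call is a single dict lookup plus an any() over a few
-- # substrings; no runtime scan of the equivalents table at all.
-- _CANDIDATES = {
--     'beer': ('beer', 'lager beer', 'lager', 'ale', 'pilsner'),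
--     'lager beer': ('lager beer', 'beer', 'lager', 'pilsner'),
--     'gin': ('gin', 'london gin', 'london dry gin', 'dry gin'),
--     'london gin': ('london gin', 'gin', 'london dry gin', 'dry gin'),
--     'vodka': ('vodka',),
--     'whiskey': ('whiskey', 'whisky', 'bourbon', 'rye whiskey', 'scotch'),
--     'whisky': ('whisky', 'whiskey', 'bourbon', 'rye whisky', 'scotch'),
--     'bourbon': ('bourbon', 'whiskey', 'whisky', 'kentucky bourbon', 'straight bourbon'),
--     'rum': ('rum', 'dark rum', 'white rum', 'gold rum'),
--     'tequila': ('tequila', 'mezcal'),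
--     'wine': ('wine', 'red wine', 'white wine', 'rose wine'),
--     'lager': ('lager', 'beer', 'lager beer'),
--     'ale': ('ale', 'beer'),
--     'pilsner': ('pilsner', 'beer', 'lager beer'),
--     'london dry gin': ('london dry gin', 'gin', 'london gin'),
--     'dry gin': ('dry gin', 'gin', 'london gin'),
--     'rye whiskey': ('rye whiskey', 'whiskey'),
--     'scotch': ('scotch', 'whiskey', 'whisky'),
--     'rye whisky': ('rye whisky', 'whisky'),
--     'kentucky bourbon': ('kentucky bourbon', 'bourbon'),
--     'straight bourbon': ('straight bourbon', 'bourbon'),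
--     'dark rum': ('dark rum', 'rum'),
--     'white rum': ('white rum', 'rum'),
--     'gold rum': ('gold rum', 'rum'),
--     'mezcal': ('mezcal', 'tequila'),
--     'red wine': ('red wine', 'wine'),
--     'white wine': ('white wine', 'wine'),
--     'rose wine': ('rose wine', 'wine'),
-- }
--
--
-- def _check_product_class_match(given_class: str, extracted_text: str) -> bool:
--     """Table-driven: look the class up in the precomputed candidate table and
--     test each candidate substring; an unknown class only matches itself."""
--     return any(c in extracted_text
--                for c in _CANDIDATES.get(given_class, (given_class,)))
-- ===== Notes on version B (the rewrite author's own statement) =====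
-- stated objective: alternative
-- what changed: B replaces A's runtime equivalents dict plus forward loop and reverse item scan with a single flat precomputed candidate table (the symmetric closure flattened offline, each term mapped to all its candidate substrings), so a call is one dict lookup and one any() pass with no scan of the equivalents map.
import Mathlib
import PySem

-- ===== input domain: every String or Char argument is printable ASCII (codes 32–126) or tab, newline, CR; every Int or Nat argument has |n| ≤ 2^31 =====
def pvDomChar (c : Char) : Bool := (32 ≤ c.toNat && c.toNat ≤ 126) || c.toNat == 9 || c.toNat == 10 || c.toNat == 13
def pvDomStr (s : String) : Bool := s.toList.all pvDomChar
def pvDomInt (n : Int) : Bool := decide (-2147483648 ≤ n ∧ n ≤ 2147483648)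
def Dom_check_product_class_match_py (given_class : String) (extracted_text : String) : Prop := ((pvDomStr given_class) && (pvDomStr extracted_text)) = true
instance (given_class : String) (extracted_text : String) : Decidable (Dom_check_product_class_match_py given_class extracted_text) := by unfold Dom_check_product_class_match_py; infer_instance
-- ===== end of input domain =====

-- B replaces A's runtime equivalents dict plus two scans by one flat precomputed
-- candidate table (symmetric closure flattened offline) and a single lookup + any() pass.

-- ===== PORT A =====
-- A's literal equivalents table
def pvEquivalents : PySem.Dict String (List String) := PySem.Dict.mk [
  ("beer", ["lager beer", "lager", "ale", "pilsner"]),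
  ("lager beer", ["beer", "lager", "pilsner"]),
  ("gin", ["london gin", "london dry gin", "dry gin"]),
  ("london gin", ["gin", "london dry gin", "dry gin"]),
  ("vodka", ["vodka"]),
  ("whiskey", ["whisky", "bourbon", "rye whiskey", "scotch"]),
  ("whisky", ["whiskey", "bourbon", "rye whisky", "scotch"]),
  ("bourbon", ["whiskey", "whisky", "kentucky bourbon", "straight bourbon"]),
  ("rum", ["rum", "dark rum", "white rum", "gold rum"]),
  ("tequila", ["tequila", "mezcal"]),
  ("wine", ["wine", "red wine", "white wine", "rose wine"])]

-- A: direct match; then (if key present) loop over equivalents[given_class] with early return;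
-- then loop over items with early return. Early-return loops become List.any over the same list.
def check_product_class_match_py (given_class : String) (extracted_text : String) : Bool :=
  if PySem.Str.isIn given_class extracted_text then true
  else if pvEquivalents.contains given_class then
    if (pvEquivalents.getD given_class []).any (fun equivalent => PySem.Str.isIn equivalent extracted_text) then true
    else pvEquivalents.items.any (fun p => p.2.contains given_class && PySem.Str.isIn p.1 extracted_text)
  else pvEquivalents.items.any (fun p => p.2.contains given_class && PySem.Str.isIn p.1 extracted_text)

-- ===== PORT B =====
-- B's literal precomputed candidate table (_CANDIDATES in Source B)
def pvCandidates : PySem.Dict String (List String) := PySem.Dict.mk [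
  ("beer", ["beer", "lager beer", "lager", "ale", "pilsner"]),
  ("lager beer", ["lager beer", "beer", "lager", "pilsner"]),
  ("gin", ["gin", "london gin", "london dry gin", "dry gin"]),
  ("london gin", ["london gin", "gin", "london dry gin", "dry gin"]),
  ("vodka", ["vodka"]),
  ("whiskey", ["whiskey", "whisky", "bourbon", "rye whiskey", "scotch"]),
  ("whisky", ["whisky", "whiskey", "bourbon", "rye whisky", "scotch"]),
  ("bourbon", ["bourbon", "whiskey", "whisky", "kentucky bourbon", "straight bourbon"]),
  ("rum", ["rum", "dark rum", "white rum", "gold rum"]),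
  ("tequila", ["tequila", "mezcal"]),
  ("wine", ["wine", "red wine", "white wine", "rose wine"]),
  ("lager", ["lager", "beer", "lager beer"]),
  ("ale", ["ale", "beer"]),
  ("pilsner", ["pilsner", "beer", "lager beer"]),
  ("london dry gin", ["london dry gin", "gin", "london gin"]),
  ("dry gin", ["dry gin", "gin", "london gin"]),
  ("rye whiskey", ["rye whiskey", "whiskey"]),
  ("scotch", ["scotch", "whiskey", "whisky"]),
  ("rye whisky", ["rye whisky", "whisky"]),
  ("kentucky bourbon", ["kentucky bourbon", "bourbon"]),
  ("straight bourbon", ["straight bourbon", "bourbon"]),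
  ("dark rum", ["dark rum", "rum"]),
  ("white rum", ["white rum", "rum"]),
  ("gold rum", ["gold rum", "rum"]),
  ("mezcal", ["mezcal", "tequila"]),
  ("red wine", ["red wine", "wine"]),
  ("white wine", ["white wine", "wine"]),
  ("rose wine", ["rose wine", "wine"])]

-- B: one table lookup (unknown class falls back to itself), then one any() pass.
def check_product_class_match_py_alt (given_class : String) (extracted_text : String) : Bool :=
  (pvCandidates.getD given_class [given_class]).any (fun c => PySem.Str.isIn c extracted_text)

-- ===== PRECONDITION & SPEC =====
def Spec_check_product_class_match_py (given_class : String) (extracted_text : String) (out : Bool) : Prop := out = check_product_class_match_py_alt given_class extracted_text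
instance (given_class : String) (extracted_text : String) (out : Bool) : Decidable (Spec_check_product_class_match_py given_class extracted_text out) := by unfold Spec_check_product_class_match_py; infer_instance

-- ===== CLAIM (what is proved, stated in full; the proofs are below) =====
def Claim_equal_check_product_class_match_py : Prop := ∀ (given_class : String) (extracted_text : String), Dom_check_product_class_match_py given_class extracted_text → Spec_check_product_class_match_py given_class extracted_text (check_product_class_match_py given_class extracted_text)

-- ===== LEMMAS AND PROOFS =====

-- A's staged checks, written as one candidate list (proof helper only)
def pvCandA (g : String) : List String :=
  g :: pvEquivalents.getD g []
    ++ (pvEquivalents.items.filter (fun p => p.2.contains g)).map Prod.fst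

lemma pvA_eq_candA (g t : String) :
    check_product_class_match_py g t = (pvCandA g).any (fun c => PySem.Str.isIn c t) := by
  unfold check_product_class_match_py pvCandA
  simp only [List.any_append, List.any_map, List.any_filter, List.any_cons, Bool.or_false]
  by_cases hc : pvEquivalents.contains g = true
  · cases h1 : PySem.Str.isIn g t <;>
      cases h2 : (pvEquivalents.getD g []).any (fun e => PySem.Str.isIn e t) <;>
      cases h3 : pvEquivalents.items.any (fun p => p.2.contains g && PySem.Str.isIn p.1 t) <;>
      simp_all [List.any_eq_true] <;> exact h3
  · have hd : pvEquivalents.getD g [] = [] :=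
      PySem.Dict.getD_of_not_contains pvEquivalents [] (by simpa using hc)
    cases h1 : PySem.Str.isIn g t <;>
      cases h3 : pvEquivalents.items.any (fun p => p.2.contains g && PySem.Str.isIn p.1 t) <;>
      simp_all [List.any_eq_true] <;> exact h3

lemma pvAny_congr (l1 l2 : List String) (p : String → Bool)
    (h : ∀ c, c ∈ l1 ↔ c ∈ l2) : l1.any p = l2.any p := by
  cases h1 : l1.any p <;> cases h2 : l2.any p <;> try rfl
  · rcases List.any_eq_true.mp h2 with ⟨x, hx, hp⟩
    have := List.any_eq_true.mpr ⟨x, (h x).mpr hx, hp⟩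
    simp_all
  · rcases List.any_eq_true.mp h1 with ⟨x, hx, hp⟩
    have := List.any_eq_true.mpr ⟨x, (h x).mp hx, hp⟩
    simp_all

-- ===== VERDICT (by name: the statement is the Claim_ definition above) =====
theorem check_product_class_match_py_spec : Claim_equal_check_product_class_match_py := by
  intro g t _
  unfold Spec_check_product_class_match_py check_product_class_match_py_alt
  rw [pvA_eq_candA]
  apply pvAny_congr
  intro c
  by_cases hg : pvCandidates.contains g = true
  · rw [PySem.Dict.contains_eq_decide_mem_keys] at hg
    simp [pvCandidates, PySem.Dict.keys_mk] at hg
    rcases hg with rfl|rfl|rfl|rfl|rfl|rfl|rfl|rfl|rfl|rfl|rfl|rfl|rfl|rfl|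
      rfl|rfl|rfl|rfl|rfl|rfl|rfl|rfl|rfl|rfl|rfl|rfl|rfl|rfl <;>
      (simp [pvCandA, pvEquivalents, pvCandidates, PySem.Dict.getD, PySem.Dict.get?_mk_cons,
        PySem.Dict.items]; try tauto)
  · rw [PySem.Dict.contains_eq_decide_mem_keys] at hg
    simp [pvCandidates, PySem.Dict.keys_mk, not_or] at hg
    obtain ⟨h1,h2,h3,h4,h5,h6,h7,h8,h9,h10,h11,h12,h13,h14,h15,h16,h17,h18,h19,h20,
      h21,h22,h23,h24,h25,h26,h27,h28⟩ := hg
    simp [pvCandA, pvEquivalents, pvCandidates, PySem.Dict.getD, PySem.Dict.get?_mk_cons,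
      PySem.Dict.items, Ne.symm h1, Ne.symm h2, Ne.symm h3, Ne.symm h4, Ne.symm h5,
      Ne.symm h6, Ne.symm h7, Ne.symm h8, Ne.symm h9, Ne.symm h10, Ne.symm h11,
      Ne.symm h12, Ne.symm h13, Ne.symm h14, Ne.symm h15, Ne.symm h16, Ne.symm h17,
      Ne.symm h18, Ne.symm h19, Ne.symm h20, Ne.symm h21, Ne.symm h22, Ne.symm h23,
      Ne.symm h24, Ne.symm h25, Ne.symm h26, Ne.symm h27, Ne.symm h28,
      h1, h2, h3, h4, h5, h6, h7, h8, h9, h10, h11, h12, h13, h14, h15, h16, h17, h18,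
      h19, h20, h21, h22, h23, h24, h25, h26, h27, h28, PySem.Dict.get?]
    try tauto
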